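-- pv_equiv track=rewrite | github.com/Smlee100/Algorithm | BJ-기초/브루트포스/3085_사탕게임.py | check
-- ===== SOURCE A (Python) =====
-- def check(a, start_row, end_row, start_col, end_col):
--     n = len(a)
--     ans = 1
--     #행 순회하면서 연속되는 숫자 세기
--     for i in range(start_row, end_row+1): #몇번행부터 몇번행까지 검사해라
--         cnt = 1 #현재 연속을 모두 저장(이전 수가 다르면 1이므로 초기화 1로 함)
--         for j in range(1, n):
--             if a[i][j] == a[i][j-1]: #이전 것과 같다면=연속 부분 찾는 것 TODO: 이전과 같은걸 찾을 때 왜 j-1?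
--                 cnt = cnt + 1 #cnt 증가
--             else: #이전 것과 다르면
--                 cnt = 1 #다시 1로 초기화
--             if cnt > ans:
--                 ans = cnt #ans 갱신하기(최대값을 찾는 것)
--     #열 순회하면서 연속되는 숫자 세기
--     for i in range(start_col, end_col+1): #몇번열부터 몇번열까지 검사해라
--         cnt = 1
--         for j in range(1, n):
--             if a[j][i] == a[j-1][i]:
--                 cnt = cnt + 1
--             else:
--                 cnt = 1
--             if cnt > ans:
--                 ans = cnt
--     return ans
-- ===== SOURCE B (Python) =====
-- # B: instead of scanning each line with a run counter, compute the positions where the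
-- # value changes ("break positions"), then take the maximum gap between consecutive breaks.
-- def check(a, start_row, end_row, start_col, end_col):
--     n = len(a)
--     if n < 2:
--         return 1
--     best = 1
--     for i in range(start_row, end_row + 1):
--         row = a[i]
--         breaks = [0] + [j for j in range(1, n) if row[j] != row[j - 1]] + [n]
--         for k in range(len(breaks) - 1):
--             best = max(best, breaks[k + 1] - breaks[k])
--     for i in range(start_col, end_col + 1):
--         breaks = [0] + [j for j in range(1, n) if a[j][i] != a[j - 1][i]] + [n]
--         for k in range(len(breaks) - 1):
--             best = max(best, breaks[k + 1] - breaks[k])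
--     return best
-- ===== Notes on version B (the rewrite author's own statement) =====
-- stated objective: alternative
-- what changed: B computes, per requested row/column, the list of break positions (indices where adjacent cells differ, with sentinels 0 and n) and takes the maximum gap between consecutive breaks, instead of A's run counter with inline reset and running maximum.
import Mathlib
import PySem

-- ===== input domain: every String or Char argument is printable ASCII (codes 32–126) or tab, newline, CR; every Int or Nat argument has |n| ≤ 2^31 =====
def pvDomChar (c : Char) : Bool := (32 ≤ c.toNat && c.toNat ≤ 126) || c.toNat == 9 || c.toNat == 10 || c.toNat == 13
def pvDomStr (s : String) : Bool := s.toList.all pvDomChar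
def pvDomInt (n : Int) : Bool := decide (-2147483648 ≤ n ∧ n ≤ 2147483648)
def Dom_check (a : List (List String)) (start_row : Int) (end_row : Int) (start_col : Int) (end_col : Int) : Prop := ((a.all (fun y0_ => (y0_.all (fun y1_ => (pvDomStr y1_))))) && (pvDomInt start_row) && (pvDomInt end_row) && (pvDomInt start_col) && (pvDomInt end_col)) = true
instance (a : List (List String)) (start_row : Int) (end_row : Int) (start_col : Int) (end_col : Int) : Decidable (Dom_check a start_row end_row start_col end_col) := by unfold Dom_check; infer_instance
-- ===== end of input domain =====

-- B replaces A's run counter with inline reset/maximum by a staged computation per line: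
-- the list of break positions (indices where adjacent cells differ, with sentinels 0 and n),
-- then the maximum gap between consecutive breaks (objective: alternative algorithm, same cost).

-- ===== PORT A =====
def check (a : List (List String)) (start_row : Int) (end_row : Int) (start_col : Int) (end_col : Int) : Int :=
  let n : Int := (a.length : Int)
  let ans : Int := 1
  let ans := (PySem.List.pyRange start_row (end_row + 1) 1).foldl (fun ans i =>
      ((PySem.List.pyRange 1 n 1).foldl (fun (p : Int × Int) j =>
          let cnt : Int :=
            if PySem.List.pyGetD (PySem.List.pyGetD a i []) j "" ==
               PySem.List.pyGetD (PySem.List.pyGetD a i []) (j - 1) "" then p.1 + 1 else 1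
          (cnt, if cnt > p.2 then cnt else p.2)) ((1 : Int), ans)).2) ans
  let ans := (PySem.List.pyRange start_col (end_col + 1) 1).foldl (fun ans i =>
      ((PySem.List.pyRange 1 n 1).foldl (fun (p : Int × Int) j =>
          let cnt : Int :=
            if PySem.List.pyGetD (PySem.List.pyGetD a j []) i "" ==
               PySem.List.pyGetD (PySem.List.pyGetD a (j - 1) []) i "" then p.1 + 1 else 1
          (cnt, if cnt > p.2 then cnt else p.2)) ((1 : Int), ans)).2) ans
  ans

-- ===== PORT B =====
def check_alt (a : List (List String)) (start_row : Int) (end_row : Int) (start_col : Int) (end_col : Int) : Int :=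
  let n : Int := (a.length : Int)
  if n < 2 then 1
  else
    let best : Int := 1
    let best := (PySem.List.pyRange start_row (end_row + 1) 1).foldl (fun best i =>
        let row := PySem.List.pyGetD a i []
        let breaks : List Int := 0 :: ((PySem.List.pyRange 1 n 1).filter
            (fun j => !(PySem.List.pyGetD row j "" == PySem.List.pyGetD row (j - 1) ""))) ++ [n]
        (PySem.List.pyRange 0 ((breaks.length : Int) - 1) 1).foldl (fun best k =>
            max best (PySem.List.pyGetD breaks (k + 1) 0 - PySem.List.pyGetD breaks k 0)) best) best
    let best := (PySem.List.pyRange start_col (end_col + 1) 1).foldl (fun best i =>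
        let breaks : List Int := 0 :: ((PySem.List.pyRange 1 n 1).filter
            (fun j => !(PySem.List.pyGetD (PySem.List.pyGetD a j []) i "" ==
                        PySem.List.pyGetD (PySem.List.pyGetD a (j - 1) []) i ""))) ++ [n]
        (PySem.List.pyRange 0 ((breaks.length : Int) - 1) 1).foldl (fun best k =>
            max best (PySem.List.pyGetD breaks (k + 1) 0 - PySem.List.pyGetD breaks k 0)) best) best
    best

-- ===== PRECONDITION & SPEC =====
-- Pre_ excludes exactly the inputs on which Python A raises IndexError: when the grid has
-- at least 2 rows and a visited range is nonempty, its endpoints must be in range, every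
-- row the row range touches (directly or via negative-index wraparound) must be at least
-- n cells wide, and every row must be wide enough for the whole column range.
def Pre_check (a : List (List String)) (start_row : Int) (end_row : Int) (start_col : Int) (end_col : Int) : Prop :=
  2 ≤ a.length →
  ((end_row < start_row ∨
      (-(a.length : Int) ≤ start_row ∧ end_row < (a.length : Int) ∧
       ∀ k : Nat, k < a.length →
         ((start_row ≤ (k : Int) ∧ (k : Int) ≤ end_row) ∨
          (start_row ≤ (k : Int) - (a.length : Int) ∧ (k : Int) - (a.length : Int) ≤ end_row)) →
         a.length ≤ (PySem.List.pyGetD a ((k : Nat) : Int) []).length)) ∧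
   (end_col < start_col ∨
      ∀ row ∈ a, -(row.length : Int) ≤ start_col ∧ end_col < (row.length : Int)))
instance (a : List (List String)) (start_row : Int) (end_row : Int) (start_col : Int) (end_col : Int) : Decidable (Pre_check a start_row end_row start_col end_col) := by unfold Pre_check; infer_instance

def pvWitness_check : List (List String) × Int × Int × Int × Int :=
  ([["a", "a"], ["a", "b"]], 0, 1, 0, 1)

def Spec_check (a : List (List String)) (start_row : Int) (end_row : Int) (start_col : Int) (end_col : Int) (out : Int) : Prop := out = check_alt a start_row end_row start_col end_col
instance (a : List (List String)) (start_row : Int) (end_row : Int) (start_col : Int) (end_col : Int) (out : Int) : Decidable (Spec_check a start_row end_row start_col end_col out) := by unfold Spec_check; infer_instance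

-- ===== CLAIM (what is proved, stated in full; the proofs are below) =====
def Claim_equal_check : Prop := ∀ (a : List (List String)) (start_row : Int) (end_row : Int) (start_col : Int) (end_col : Int), Dom_check a start_row end_row start_col end_col → Pre_check a start_row end_row start_col end_col → Spec_check a start_row end_row start_col end_col (check a start_row end_row start_col end_col)

-- ===== LEMMAS AND PROOFS =====

-- A's inner loop as a structural scan: state (current run length, best so far)
def scanA : List String → String → Int → Int → Int × Int
  | [], _, cnt, ans => (cnt, ans)
  | x :: xs, prev, cnt, ans =>
      let c : Int := if x == prev then cnt + 1 else 1
      scanA xs x c (if c > ans then c else ans)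

-- leading run of elements equal to x, and the remainder
def runSplit (x : String) : List String → Nat × List String
  | [] => (0, [])
  | y :: ys => if y == x then ((runSplit x ys).1 + 1, (runSplit x ys).2) else (0, y :: ys)

theorem runSplit_len (x : String) (t : List String) : (runSplit x t).2.length ≤ t.length := by
  induction t with
  | nil => simp [runSplit]
  | cons y ys ih => by_cases h : (y == x) = true <;> simp [runSplit, h] <;> omega

-- longest run, structurally: split off the first run, recurse on the rest
def lrSpec : List String → Int
  | [] => 0
  | x :: xs => max (1 + ((runSplit x xs).1 : Int)) (lrSpec (runSplit x xs).2)
termination_by t => t.length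
decreasing_by have := runSplit_len x xs; simp; omega

-- A's scan computes: best-so-far ⊔ (current run extended) ⊔ best run of the remainder
theorem scanA_eq : ∀ (t : List String) (h : String) (cnt ans : Int), 1 ≤ cnt → cnt ≤ ans →
    (scanA t h cnt ans).2
      = max ans (max (cnt + ((runSplit h t).1 : Int)) (lrSpec (runSplit h t).2)) := by
  intro t
  induction t with
  | nil =>
      intro h cnt ans h1 h2
      simp [scanA, runSplit, lrSpec]
      omega
  | cons x xs ih =>
      intro h cnt ans h1 h2
      rw [scanA]
      by_cases hx : (x == h) = true
      · simp only [hx, if_true]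
        have hc : (if cnt + 1 > ans then cnt + 1 else ans) = max ans (cnt + 1) := by
          split <;> omega
        have hxe : x = h := eq_of_beq hx
        subst hxe
        rw [hc, ih x (cnt + 1) _ (by omega) (le_max_right _ _)]
        simp only [runSplit, hx, if_true]
        push_cast
        rcases max_cases (cnt + 1 + ((runSplit x xs).1 : Int)) (lrSpec (runSplit x xs).2) with ⟨he, _⟩ | ⟨he, _⟩ <;>
          rcases max_cases ans (cnt + 1) with ⟨ha, _⟩ | ⟨ha, _⟩ <;>
          rcases max_cases (cnt + (((runSplit x xs).1 : Int) + 1)) (lrSpec (runSplit x xs).2) with ⟨hf, _⟩ | ⟨hf, _⟩ <;>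
          omega
      · have hcnd : (x == h) = false := by simpa using hx
        simp only [hcnd, Bool.false_eq_true, if_false]
        have hc : (if (1 : Int) > ans then (1 : Int) else ans) = ans := by split <;> omega
        rw [hc, ih x 1 ans le_rfl (by omega)]
        simp only [runSplit, hcnd, Bool.false_eq_true, if_false, lrSpec]
        push_cast
        rcases max_cases ((1 : Int) + ((runSplit x xs).1 : Int)) (lrSpec (runSplit x xs).2) with ⟨he, _⟩ | ⟨he, _⟩ <;>
          omega

theorem scanA_lrSpec (t : List String) (h : String) (ans : Int) (h1 : 1 ≤ ans) :
    (scanA t h 1 ans).2 = max ans (lrSpec (h :: t)) := by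
  rw [scanA_eq t h 1 ans le_rfl h1, lrSpec]

-- A's indexed inner loop equals scanA over the virtual sequence g 0, g 1, …
theorem fold_scan (g : Int → String) : ∀ (t : List String) (k : Int) (prev : String) (cnt ans : Int),
    (∀ d : Nat, (hd : d < t.length) → t[d] = g (k + 1 + d)) → prev = g k →
    (PySem.List.pyRange (k + 1) (k + 1 + t.length) 1).foldl
      (fun (p : Int × Int) j =>
        let c : Int := if g j == g (j - 1) then p.1 + 1 else 1
        (c, if c > p.2 then c else p.2)) (cnt, ans)
    = scanA t prev cnt ans := by
  intro t
  induction t with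
  | nil =>
      intro k prev cnt ans ht hp
      rw [PySem.List.pyRange_one_eq_nil (by simp)]
      simp [scanA]
  | cons x xs ih =>
      intro k prev cnt ans ht hp
      rw [PySem.List.pyRange_one_cons (by simp)]
      rw [List.foldl_cons]
      have hx : g (k + 1) = x := by
        have := ht 0 (by simp)
        simpa using this.symm
      have hk : k + 1 - 1 = k := by ring
      simp only [hk, hx, ← hp]
      have hlen : k + 1 + ((x :: xs).length : Int) = (k + 1) + 1 + (xs.length : Int) := by
        simp; ring
      rw [hlen, ih (k + 1)]
      · rfl
      · intro d hd
        have := ht (d + 1) (by simpa using Nat.succ_lt_succ hd)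
        simpa [add_assoc, add_comm, add_left_comm] using this
      · exact hx.symm

-- the per-index inner result, as A's port computes it, for a virtual line g
theorem col_inner (g : Int → String) (n : Nat) (h2 : 2 ≤ n) (ans : Int) (h1 : 1 ≤ ans) :
    ((PySem.List.pyRange 1 (n : Int) 1).foldl
      (fun (p : Int × Int) j =>
        let c : Int := if g j == g (j - 1) then p.1 + 1 else 1
        (c, if c > p.2 then c else p.2)) ((1 : Int), ans)).2
    = max ans (lrSpec ((PySem.List.pyRange 0 (n : Int) 1).map g)) := by
  have hL : (PySem.List.pyRange 0 (n : Int) 1).map g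
      = g 0 :: (PySem.List.pyRange 1 (n : Int) 1).map g := by
    rw [PySem.List.pyRange_one_cons (by exact_mod_cast by omega)]
    simp
  have hlen : ((PySem.List.pyRange 1 (n : Int) 1).map g).length = n - 1 := by
    simp [PySem.List.length_pyRange_one]
  have hfold := fold_scan g ((PySem.List.pyRange 1 (n : Int) 1).map g) 0 (g 0) 1 ans
    (by
      intro d hd
      rw [List.getElem_map, PySem.List.getElem_pyRange_one]
      ring_nf)
    rfl
  have hbound : (0 : Int) + 1 + (((PySem.List.pyRange 1 (n : Int) 1).map g).length : Int) = (n : Int) := by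
    rw [hlen]; push_cast; omega
  rw [hbound] at hfold
  rw [zero_add] at hfold
  rw [hfold, scanA_lrSpec _ _ _ h1, ← hL]

-- ===== B-side lemmas: break positions and maximum gap =====

-- the break positions of t (sitting at virtual indices k+1, k+2, …) after previous element prev
def bl : List String → String → Int → List Int
  | [], _, _ => []
  | x :: xs, prev, k => if x == prev then bl xs x (k + 1) else (k + 1) :: bl xs x (k + 1)

-- B's filtered range comprehension equals bl over the virtual sequence
theorem filter_bl (g : Int → String) : ∀ (t : List String) (k : Int) (prev : String),
    (∀ d : Nat, (hd : d < t.length) → t[d] = g (k + 1 + d)) → prev = g k →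
    (PySem.List.pyRange (k + 1) (k + 1 + t.length) 1).filter (fun j => !(g j == g (j - 1))) = bl t prev k := by
  intro t
  induction t with
  | nil =>
      intro k prev ht hp
      rw [PySem.List.pyRange_one_eq_nil (by simp)]
      simp [bl]
  | cons x xs ih =>
      intro k prev ht hp
      rw [PySem.List.pyRange_one_cons (by simp), List.filter_cons]
      have hx : g (k + 1) = x := by
        have := ht 0 (by simp)
        simpa using this.symm
      have hk : k + 1 - 1 = k := by ring
      have hrest : (PySem.List.pyRange (k + 1 + 1) (k + 1 + ((x :: xs).length : Int)) 1).filter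
          (fun j => !(g j == g (j - 1))) = bl xs x (k + 1) := by
        have hlen : k + 1 + ((x :: xs).length : Int) = (k + 1) + 1 + (xs.length : Int) := by
          simp; ring
        rw [hlen, ih (k + 1)]
        · intro d hd
          have := ht (d + 1) (by simpa using Nat.succ_lt_succ hd)
          simpa [add_assoc, add_comm, add_left_comm] using this
        · exact hx.symm
      simp only [List.length_cons] at hrest
      push_cast at hrest
      simp only [hk, hx, ← hp]
      by_cases hc : (x == prev) = true
      · simp [bl, hc, hrest]
      · have hc' : (x == prev) = false := by simpa using hc
        simp [bl, hc', hrest]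

-- maximum gap between consecutive break positions, with final sentinel n
def mgaps : Int → List Int → Int → Int
  | prev, [], n => n - prev
  | prev, b :: bs, n => max (b - prev) (mgaps b bs n)

-- the maximum gap over bl equals the longest-run spec
theorem mgaps_bl : ∀ (t : List String) (x : String) (k prev : Int), prev ≤ k →
    mgaps prev (bl t x k) (k + 1 + (t.length : Int))
      = max ((k + 1 - prev) + ((runSplit x t).1 : Int)) (lrSpec (runSplit x t).2) := by
  intro t
  induction t with
  | nil =>
      intro x k prev hp
      simp only [bl, mgaps, runSplit, lrSpec]
      simp
      omega
  | cons y ys ih =>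
      intro x k prev hp
      have hlen : k + 1 + (((y :: ys).length : Nat) : Int) = (k + 1) + 1 + ((ys.length : Nat) : Int) := by
        simp; ring
      by_cases hc : (y == x) = true
      · have hyx : y = x := eq_of_beq hc
        subst hyx
        simp only [bl, hc, if_true, runSplit]
        rw [hlen, ih y (k + 1) prev (by omega)]
        push_cast
        congr 1
        ring
      · have hc' : (y == x) = false := by simpa using hc
        simp only [bl, hc', Bool.false_eq_true, if_false, runSplit, mgaps]
        rw [hlen, ih y (k + 1) (k + 1) le_rfl]
        have : ((k : Int) + 1 + 1 - (k + 1)) = 1 := by ring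
        rw [this, ← lrSpec]
        push_cast
        norm_num

-- adjacent differences of a list, structurally
def diffList : List Int → List Int
  | a :: b :: rest => (b - a) :: diffList (b :: rest)
  | _ => []

theorem diffList_length : ∀ (bs : List Int), (diffList bs).length = bs.length - 1 := by
  intro bs
  match bs with
  | [] => rfl
  | [a] => rfl
  | a :: b :: rest =>
      show (diffList (b :: rest)).length + 1 = _
      rw [diffList_length (b :: rest)]
      simp

theorem diffList_getElem : ∀ (bs : List Int) (k : Nat) (h : k < (diffList bs).length),
    (diffList bs)[k] = bs[k + 1]'(by have := diffList_length bs; omega) - bs[k]'(by have := diffList_length bs; omega) := by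
  intro bs
  match bs with
  | [] => intro k h; simp [diffList] at h
  | [a] => intro k h; simp [diffList] at h
  | a :: b :: rest =>
      intro k h
      match k with
      | 0 => rfl
      | k + 1 =>
          show (diffList (b :: rest))[k]'_ = _
          rw [diffList_getElem (b :: rest) k]
          rfl

-- B's indexed gap comprehension is diffList
theorem map_diffList (bs : List Int) :
    (PySem.List.pyRange 0 ((bs.length : Int) - 1) 1).map
      (fun k => PySem.List.pyGetD bs (k + 1) 0 - PySem.List.pyGetD bs k 0) = diffList bs := by
  apply List.ext_getElem
  · simp [PySem.List.length_pyRange_one, diffList_length]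
  · intro k hk hk'
    rw [List.getElem_map, PySem.List.getElem_pyRange_one, diffList_getElem bs k hk']
    have hklen : k + 1 < bs.length := by
      have := diffList_length bs
      omega
    rw [zero_add]
    have h1 : ((k : Int) + 1) = ((k + 1 : Nat) : Int) := by push_cast; ring
    rw [h1, PySem.List.pyGetD_natCast, PySem.List.pyGetD_natCast]
    rw [List.getD_eq_getElem bs 0 hklen, List.getD_eq_getElem bs 0 (by omega)]

-- a running max over the adjacent differences is the structural maximum gap
theorem foldl_max_diffList : ∀ (l : List Int) (prev n b : Int),
    (diffList (prev :: l ++ [n])).foldl max b = max b (mgaps prev l n) := by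
  intro l
  induction l with
  | nil => intro prev n b; simp [diffList, mgaps]
  | cons c l' ih =>
      intro prev n b
      show ((c - prev) :: diffList (c :: l' ++ [n])).foldl max b = _
      rw [List.foldl_cons, ih c n (max b (c - prev))]
      simp only [mgaps]
      rw [max_assoc]

-- the per-index inner result, as B's port computes it, for a virtual line g
theorem b_inner (g : Int → String) (n : Nat) (h2 : 2 ≤ n) (b : Int) (bs : List Int)
    (hbs : bs = (0 : Int) :: ((PySem.List.pyRange 1 (n : Int) 1).filter (fun j => !(g j == g (j - 1)))) ++ [(n : Int)]) :
    (PySem.List.pyRange 0 ((bs.length : Int) - 1) 1).foldl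
      (fun b k => max b (PySem.List.pyGetD bs (k + 1) 0 - PySem.List.pyGetD bs k 0)) b
    = max b (lrSpec ((PySem.List.pyRange 0 (n : Int) 1).map g)) := by
  set t : List String := (PySem.List.pyRange 1 (n : Int) 1).map g with ht
  have hL : (PySem.List.pyRange 0 (n : Int) 1).map g = g 0 :: t := by
    rw [PySem.List.pyRange_one_cons (by exact_mod_cast by omega)]
    simp [ht]
  have htlen : t.length = n - 1 := by
    simp [ht, PySem.List.length_pyRange_one]
  have hfil : (PySem.List.pyRange 1 (n : Int) 1).filter (fun j => !(g j == g (j - 1))) = bl t (g 0) 0 := by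
    have hb : (0 : Int) + 1 + (t.length : Int) = (n : Int) := by
      rw [htlen]; push_cast; omega
    rw [← hb]
    exact filter_bl g t 0 (g 0)
      (by
        intro d hd
        simp only [ht, List.getElem_map, PySem.List.getElem_pyRange_one]
        ring_nf)
      rfl
  have hmap : (PySem.List.pyRange 0 ((bs.length : Int) - 1) 1).map
      (fun k => PySem.List.pyGetD bs (k + 1) 0 - PySem.List.pyGetD bs k 0) = diffList bs := map_diffList bs
  rw [← List.foldl_map (f := fun k => PySem.List.pyGetD bs (k + 1) 0 - PySem.List.pyGetD bs k 0) (g := max)]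
  rw [hmap, hbs, hfil, foldl_max_diffList]
  congr 1
  have hn : (n : Int) = 0 + 1 + (t.length : Int) := by rw [htlen]; push_cast; omega
  rw [hL, lrSpec, hn, mgaps_bl t (g 0) 0 0 le_rfl]
  norm_num

-- fold two pointwise-equal step functions preserving an invariant
theorem foldl_congr_inv {α : Type} (P : Int → Prop) : ∀ (l : List α) (fA fB : Int → α → Int),
    (∀ i ∈ l, ∀ b, P b → fA b i = fB b i ∧ P (fB b i)) →
    ∀ b, P b → l.foldl fA b = l.foldl fB b ∧ P (l.foldl fB b) := by
  intro l
  induction l with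
  | nil => intro fA fB h b hb; exact ⟨rfl, hb⟩
  | cons x xs ih =>
      intro fA fB h b hb
      obtain ⟨heq, hP⟩ := h x (by simp) b hb
      rw [List.foldl_cons, List.foldl_cons, heq]
      exact ih fA fB (fun i hi => h i (by simp [hi])) (fB b x) hP

-- identity fold
theorem foldl_id (l : List Int) (b : Int) : l.foldl (fun b _ => b) b = b := by
  induction l generalizing b with
  | nil => rfl
  | cons x xs ih => simpa using ih b

-- ===== VERDICT (by name: the statement is the Claim_ definition above) =====
theorem check_spec : Claim_equal_check := by
  intro a start_row end_row start_col end_col hdom hpre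
  unfold Spec_check
  have hA : check a start_row end_row start_col end_col =
      (PySem.List.pyRange start_col (end_col + 1) 1).foldl (fun ans i => ((PySem.List.pyRange 1 ((a.length : Nat) : Int) 1).foldl (fun (p : Int × Int) j => let cnt : Int := if PySem.List.pyGetD (PySem.List.pyGetD a j []) i "" == PySem.List.pyGetD (PySem.List.pyGetD a (j - 1) []) i "" then p.1 + 1 else 1; (cnt, if cnt > p.2 then cnt else p.2)) ((1 : Int), ans)).2) ((PySem.List.pyRange start_row (end_row + 1) 1).foldl (fun ans i => ((PySem.List.pyRange 1 ((a.length : Nat) : Int) 1).foldl (fun (p : Int × Int) j => let cnt : Int := if PySem.List.pyGetD (PySem.List.pyGetD a i []) j "" == PySem.List.pyGetD (PySem.List.pyGetD a i []) (j - 1) "" then p.1 + 1 else 1; (cnt, if cnt > p.2 then cnt else p.2)) ((1 : Int), ans)).2) 1) := rfl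
  by_cases hn : 2 ≤ a.length
  · have hB : check_alt a start_row end_row start_col end_col =
        (PySem.List.pyRange start_col (end_col + 1) 1).foldl (fun best i => (PySem.List.pyRange 0 ((((0 : Int) :: ((PySem.List.pyRange 1 ((a.length : Nat) : Int) 1).filter (fun j => !(PySem.List.pyGetD (PySem.List.pyGetD a j []) i "" == PySem.List.pyGetD (PySem.List.pyGetD a (j - 1) []) i ""))) ++ [((a.length : Nat) : Int)]).length : Int) - 1) 1).foldl (fun best k => max best (PySem.List.pyGetD ((0 : Int) :: ((PySem.List.pyRange 1 ((a.length : Nat) : Int) 1).filter (fun j => !(PySem.List.pyGetD (PySem.List.pyGetD a j []) i "" == PySem.List.pyGetD (PySem.List.pyGetD a (j - 1) []) i ""))) ++ [((a.length : Nat) : Int)]) (k + 1) 0 - PySem.List.pyGetD ((0 : Int) :: ((PySem.List.pyRange 1 ((a.length : Nat) : Int) 1).filter (fun j => !(PySem.List.pyGetD (PySem.List.pyGetD a j []) i "" == PySem.List.pyGetD (PySem.List.pyGetD a (j - 1) []) i ""))) ++ [((a.length : Nat) : Int)]) k 0)) best) ((PySem.List.pyRange start_row (end_row + 1) 1).foldl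 (fun best i => (PySem.List.pyRange 0 ((((0 : Int) :: ((PySem.List.pyRange 1 ((a.length : Nat) : Int) 1).filter (fun j => !(PySem.List.pyGetD (PySem.List.pyGetD a i []) j "" == PySem.List.pyGetD (PySem.List.pyGetD a i []) (j - 1) ""))) ++ [((a.length : Nat) : Int)]).length : Int) - 1) 1).foldl (fun best k => max best (PySem.List.pyGetD ((0 : Int) :: ((PySem.List.pyRange 1 ((a.length : Nat) : Int) 1).filter (fun j => !(PySem.List.pyGetD (PySem.List.pyGetD a i []) j "" == PySem.List.pyGetD (PySem.List.pyGetD a i []) (j - 1) ""))) ++ [((a.length : Nat) : Int)]) (k + 1) 0 - PySem.List.pyGetD ((0 : Int) :: ((PySem.List.pyRange 1 ((a.length : Nat) : Int) 1).filter (fun j => !(PySem.List.pyGetD (PySem.List.pyGetD a i []) j "" == PySem.List.pyGetD (PySem.List.pyGetD a i []) (j - 1) ""))) ++ [((a.length : Nat) : Int)]) k 0)) best) 1) := by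
      show (if ((a.length : Nat) : Int) < 2 then 1 else _) = _
      rw [if_neg (by omega)]
    have hstepA1 := foldl_congr_inv (fun b => 1 ≤ b) (PySem.List.pyRange start_row (end_row + 1) 1)
        (fun ans i => ((PySem.List.pyRange 1 ((a.length : Nat) : Int) 1).foldl (fun (p : Int × Int) j => let cnt : Int := if PySem.List.pyGetD (PySem.List.pyGetD a i []) j "" == PySem.List.pyGetD (PySem.List.pyGetD a i []) (j - 1) "" then p.1 + 1 else 1; (cnt, if cnt > p.2 then cnt else p.2)) ((1 : Int), ans)).2)
        (fun b i => max b (lrSpec ((PySem.List.pyRange 0 ((a.length : Nat) : Int) 1).map (fun j => PySem.List.pyGetD (PySem.List.pyGetD a i []) j ""))))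
        (by
          intro i hi b hb
          refine ⟨?_, le_trans hb (le_max_left _ _)⟩
          beta_reduce
          exact col_inner (fun j => PySem.List.pyGetD (PySem.List.pyGetD a i []) j "") a.length hn b hb)
        1 le_rfl
    have hstepA2 := foldl_congr_inv (fun b => 1 ≤ b) (PySem.List.pyRange start_col (end_col + 1) 1)
        (fun ans i => ((PySem.List.pyRange 1 ((a.length : Nat) : Int) 1).foldl (fun (p : Int × Int) j => let cnt : Int := if PySem.List.pyGetD (PySem.List.pyGetD a j []) i "" == PySem.List.pyGetD (PySem.List.pyGetD a (j - 1) []) i "" then p.1 + 1 else 1; (cnt, if cnt > p.2 then cnt else p.2)) ((1 : Int), ans)).2)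
        (fun b i => max b (lrSpec ((PySem.List.pyRange 0 ((a.length : Nat) : Int) 1).map (fun j => PySem.List.pyGetD (PySem.List.pyGetD a j []) i ""))))
        (by
          intro i hi b hb
          refine ⟨?_, le_trans hb (le_max_left _ _)⟩
          beta_reduce
          exact col_inner (fun j => PySem.List.pyGetD (PySem.List.pyGetD a j []) i "") a.length hn b hb)
        _ hstepA1.2
    have hstepB1 := foldl_congr_inv (fun b => 1 ≤ b) (PySem.List.pyRange start_row (end_row + 1) 1)
        (fun best i => (PySem.List.pyRange 0 ((((0 : Int) :: ((PySem.List.pyRange 1 ((a.length : Nat) : Int) 1).filter (fun j => !(PySem.List.pyGetD (PySem.List.pyGetD a i []) j "" == PySem.List.pyGetD (PySem.List.pyGetD a i []) (j - 1) ""))) ++ [((a.length : Nat) : Int)]).length : Int) - 1) 1).foldl (fun best k => max best (PySem.List.pyGetD ((0 : Int) :: ((PySem.List.pyRange 1 ((a.length : Nat) : Int) 1).filter (fun j => !(PySem.List.pyGetD (PySem.List.pyGetD a i []) j "" == PySem.List.pyGetD (PySem.List.pyGetD a i []) (j - 1) ""))) ++ [((a.length : Nat) : Int)]) (k + 1) 0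 - PySem.List.pyGetD ((0 : Int) :: ((PySem.List.pyRange 1 ((a.length : Nat) : Int) 1).filter (fun j => !(PySem.List.pyGetD (PySem.List.pyGetD a i []) j "" == PySem.List.pyGetD (PySem.List.pyGetD a i []) (j - 1) ""))) ++ [((a.length : Nat) : Int)]) k 0)) best)
        (fun b i => max b (lrSpec ((PySem.List.pyRange 0 ((a.length : Nat) : Int) 1).map (fun j => PySem.List.pyGetD (PySem.List.pyGetD a i []) j ""))))
        (by
          intro i hi b hb
          refine ⟨?_, le_trans hb (le_max_left _ _)⟩
          beta_reduce
          exact b_inner (fun j => PySem.List.pyGetD (PySem.List.pyGetD a i []) j "") a.length hn b _ rfl)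
        1 le_rfl
    have hstepB2 := foldl_congr_inv (fun b => 1 ≤ b) (PySem.List.pyRange start_col (end_col + 1) 1)
        (fun best i => (PySem.List.pyRange 0 ((((0 : Int) :: ((PySem.List.pyRange 1 ((a.length : Nat) : Int) 1).filter (fun j => !(PySem.List.pyGetD (PySem.List.pyGetD a j []) i "" == PySem.List.pyGetD (PySem.List.pyGetD a (j - 1) []) i ""))) ++ [((a.length : Nat) : Int)]).length : Int) - 1) 1).foldl (fun best k => max best (PySem.List.pyGetD ((0 : Int) :: ((PySem.List.pyRange 1 ((a.length : Nat) : Int) 1).filter (fun j => !(PySem.List.pyGetD (PySem.List.pyGetD a j []) i "" == PySem.List.pyGetD (PySem.List.pyGetD a (j - 1) []) i ""))) ++ [((a.length : Nat) : Int)]) (k + 1) 0 - PySem.List.pyGetD ((0 : Int) :: ((PySem.List.pyRange 1 ((a.length : Nat) : Int) 1).filter (fun j => !(PySem.List.pyGetD (PySem.List.pyGetD a j []) i "" == PySem.List.pyGetD (PySem.List.pyGetD a (j - 1) []) i ""))) ++ [((a.length : Nat) : Int)]) k 0)) best)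
        (fun b i => max b (lrSpec ((PySem.List.pyRange 0 ((a.length : Nat) : Int) 1).map (fun j => PySem.List.pyGetD (PySem.List.pyGetD a j []) i ""))))
        (by
          intro i hi b hb
          refine ⟨?_, le_trans hb (le_max_left _ _)⟩
          beta_reduce
          exact b_inner (fun j => PySem.List.pyGetD (PySem.List.pyGetD a j []) i "") a.length hn b _ rfl)
        _ hstepA1.2
    rw [hA, hB, hstepA1.1, hstepB1.1, hstepA2.1, hstepB2.1]
  · have hB1 : check_alt a start_row end_row start_col end_col = 1 := by
      show (if ((a.length : Nat) : Int) < 2 then 1 else _) = 1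
      rw [if_pos (by omega)]
    have hnil : PySem.List.pyRange 1 ((a.length : Nat) : Int) 1 = [] :=
      PySem.List.pyRange_one_eq_nil (by omega)
    have e1 := foldl_congr_inv (fun _ => True) (PySem.List.pyRange start_row (end_row + 1) 1)
        (fun ans i => ((PySem.List.pyRange 1 ((a.length : Nat) : Int) 1).foldl (fun (p : Int × Int) j => let cnt : Int := if PySem.List.pyGetD (PySem.List.pyGetD a i []) j "" == PySem.List.pyGetD (PySem.List.pyGetD a i []) (j - 1) "" then p.1 + 1 else 1; (cnt, if cnt > p.2 then cnt else p.2)) ((1 : Int), ans)).2)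
        (fun b _ => b)
        (by intro i hi b _; refine ⟨?_, trivial⟩; beta_reduce; rw [hnil]; rfl)
        1 trivial
    have e2 := foldl_congr_inv (fun _ => True) (PySem.List.pyRange start_col (end_col + 1) 1)
        (fun ans i => ((PySem.List.pyRange 1 ((a.length : Nat) : Int) 1).foldl (fun (p : Int × Int) j => let cnt : Int := if PySem.List.pyGetD (PySem.List.pyGetD a j []) i "" == PySem.List.pyGetD (PySem.List.pyGetD a (j - 1) []) i "" then p.1 + 1 else 1; (cnt, if cnt > p.2 then cnt else p.2)) ((1 : Int), ans)).2)
        (fun b _ => b)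
        (by intro i hi b _; refine ⟨?_, trivial⟩; beta_reduce; rw [hnil]; rfl)
        1 trivial
    rw [hA, hB1, e1.1, foldl_id]
    rw [e2.1, foldl_id]
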